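-- pv_equiv track=rewrite | github.com/WestonCombs/Email-with-Microsoft-Power-Automate-Pipeline | trackingNumbersViewer/tracking_numbers_viewer.py | _aggregate_counts_and_link
-- ===== SOURCE A (Python) =====
-- from collections import Counter
--
-- def _aggregate_counts_and_link(
--     lines: list[tuple[str, bool | None]],
-- ) -> tuple[dict[str, int], dict[str, bool]]:
--     counts: Counter[str] = Counter()
--     link_any: dict[str, bool] = {}
--     for num, conf in lines:
--         counts[num] += 1
--         ok = conf is True
--         link_any[num] = link_any.get(num, False) or ok
--     return dict(counts), link_any
-- ===== SOURCE B (Python) =====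
-- def _aggregate_counts_and_link(
--     lines: list[tuple[str, bool | None]],
-- ) -> tuple[dict[str, int], dict[str, bool]]:
--     groups: dict[str, list[bool | None]] = {}
--     for num, conf in lines:
--         groups.setdefault(num, []).append(conf)
--     counts = {num: len(cs) for num, cs in groups.items()}
--     link_any = {num: any(c is True for c in cs) for num, cs in groups.items()}
--     return counts, link_any
-- ===== Notes on version B (the rewrite author's own statement) =====
-- stated objective: alternative
-- what changed: Replaces the fused Counter+flag incrementing loop with a grouping pass that collects each number's confidence list, then derives the count dict and the any-True dict from the grouped representation.
import Mathlib
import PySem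

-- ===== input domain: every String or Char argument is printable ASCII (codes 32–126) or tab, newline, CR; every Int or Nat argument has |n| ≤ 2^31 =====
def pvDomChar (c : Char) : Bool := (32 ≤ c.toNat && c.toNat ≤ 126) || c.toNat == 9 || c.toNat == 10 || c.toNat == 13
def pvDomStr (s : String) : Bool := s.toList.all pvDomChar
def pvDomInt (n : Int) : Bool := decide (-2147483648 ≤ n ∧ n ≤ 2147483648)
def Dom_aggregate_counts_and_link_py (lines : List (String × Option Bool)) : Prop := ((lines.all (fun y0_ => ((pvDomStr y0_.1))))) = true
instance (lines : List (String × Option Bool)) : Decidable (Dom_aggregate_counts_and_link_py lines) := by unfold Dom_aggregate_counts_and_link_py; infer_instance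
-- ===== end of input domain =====

-- B replaces A's fused Counter+flag loop by one grouping pass and two derivations from the groups (objective: alternative decomposition, same cost).

-- ===== PORT A =====
def aggregate_counts_and_link_py (lines : List (String × Option Bool)) : (List (String × Int)) × (List (String × Bool)) :=
  let st := lines.foldl
    (fun (st : PySem.Dict String Int × PySem.Dict String Bool) nc =>
      let counts := st.1.modify nc.1 0 (· + 1)
      let ok := nc.2 == some true
      let link_any := st.2.insert nc.1 (st.2.getD nc.1 false || ok)
      (counts, link_any))
    (PySem.Dict.empty, PySem.Dict.empty)
  (st.1.items, st.2.items)

-- ===== PORT B =====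
def aggregate_counts_and_link_py_alt (lines : List (String × Option Bool)) : (List (String × Int)) × (List (String × Bool)) :=
  let groups : PySem.Dict String (List (Option Bool)) :=
    lines.foldl (fun g nc => g.modify nc.1 [] (· ++ [nc.2])) PySem.Dict.empty
  let counts := groups.items.map (fun p => (p.1, (p.2.length : Int)))
  let link_any := groups.items.map (fun p => (p.1, p.2.any (· == some true)))
  (counts, link_any)

-- ===== PRECONDITION & SPEC =====
def Spec_aggregate_counts_and_link_py (lines : List (String × Option Bool)) (out : (List (String × Int)) × (List (String × Bool))) : Prop := out = aggregate_counts_and_link_py_alt lines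
instance (lines : List (String × Option Bool)) (out : (List (String × Int)) × (List (String × Bool))) : Decidable (Spec_aggregate_counts_and_link_py lines out) := by unfold Spec_aggregate_counts_and_link_py; infer_instance

-- ===== CLAIM (what is proved, stated in full; the proofs are below) =====
def Claim_equal_aggregate_counts_and_link_py : Prop := ∀ (lines : List (String × Option Bool)), Dom_aggregate_counts_and_link_py lines → Spec_aggregate_counts_and_link_py lines (aggregate_counts_and_link_py lines)

-- ===== LEMMAS AND PROOFS =====

/-- Map a function over a dict's values, keeping keys and order. -/
def pvMapVal {α β : Type} (f : α → β) (d : PySem.Dict String α) : PySem.Dict String β :=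
  PySem.Dict.mk (d.items.map (fun p => (p.1, f p.2)))

theorem pv_get?_mk_map {α β : Type} (f : α → β) (L : List (String × α)) (k : String) :
    (PySem.Dict.mk (L.map (fun p => (p.1, f p.2)))).get? k = ((PySem.Dict.mk L).get? k).map f := by
  induction L with
  | nil => rfl
  | cons p rest ih =>
    obtain ⟨k1, v1⟩ := p
    simp only [List.map_cons, PySem.Dict.get?_mk_cons]
    by_cases h : k1 == k
    · simp [h]
    · simp [h, ih]

theorem pv_get?_mapVal {α β : Type} (f : α → β) (d : PySem.Dict String α) (k : String) :
    (pvMapVal f d).get? k = (d.get? k).map f := by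
  cases d with
  | mk L => exact pv_get?_mk_map f L k

theorem pv_contains_mapVal {α β : Type} (f : α → β) (d : PySem.Dict String α) (k : String) :
    (pvMapVal f d).contains k = d.contains k := by
  rw [PySem.Dict.contains_eq_isSome_get?, PySem.Dict.contains_eq_isSome_get?, pv_get?_mapVal]
  cases d.get? k <;> rfl

theorem pv_insert_mapVal {α β : Type} (f : α → β) (d : PySem.Dict String α) (k : String) (v : α) :
    (pvMapVal f d).insert k (f v) = pvMapVal f (d.insert k v) := by
  apply PySem.Dict.ext
  rw [PySem.Dict.items_insert, pv_contains_mapVal]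
  unfold pvMapVal
  rw [PySem.Dict.items_insert]
  by_cases h : d.contains k = true
  · rw [if_pos h, if_pos h, List.map_map, List.map_map]
    apply List.map_congr_left
    intro p _
    by_cases hp : p.1 = k
    · simp [hp]
    · simp [hp]
  · rw [if_neg h, if_neg h]
    simp

theorem pv_getD_mapVal {α β : Type} (f : α → β) (d : PySem.Dict String α) (k : String) (d0 : β) :
    (pvMapVal f d).getD k d0 = ((d.get? k).map f).getD d0 := by
  rw [PySem.Dict.getD_eq_get?_getD, pv_get?_mapVal]

/-- One step of A's fold matches one step of B's grouping fold, through the value maps. -/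
theorem pv_step (g : PySem.Dict String (List (Option Bool))) (k : String) (conf : Option Bool) :
    ((pvMapVal (fun cs => (cs.length : Int)) g).modify k 0 (· + 1),
      (pvMapVal (fun cs => cs.any (· == some true)) g).insert k
        ((pvMapVal (fun cs => cs.any (· == some true)) g).getD k false || (conf == some true)))
    = (pvMapVal (fun cs => (cs.length : Int)) (g.modify k [] (· ++ [conf])),
       pvMapVal (fun cs => cs.any (· == some true)) (g.modify k [] (· ++ [conf]))) := by
  simp only [PySem.Dict.modify, Prod.mk.injEq]
  refine ⟨?_, ?_⟩
  · have h1 : (pvMapVal (fun cs => (cs.length : Int)) g).getD k 0 + 1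
        = ((g.getD k [] ++ [conf]).length : Int) := by
      rw [pv_getD_mapVal, PySem.Dict.getD_eq_get?_getD]
      cases g.get? k <;> simp
    rw [h1]
    exact pv_insert_mapVal (fun cs => (cs.length : Int)) g k (g.getD k [] ++ [conf])
  · have h2 : ((pvMapVal (fun cs => cs.any (· == some true)) g).getD k false || (conf == some true))
        = ((g.getD k [] ++ [conf]).any (· == some true)) := by
      rw [pv_getD_mapVal, PySem.Dict.getD_eq_get?_getD]
      cases g.get? k <;> simp [List.any_append]
    rw [h2]
    exact pv_insert_mapVal (fun cs => cs.any (· == some true)) g k (g.getD k [] ++ [conf])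

theorem pv_main (lines : List (String × Option Bool)) :
    ∀ (g : PySem.Dict String (List (Option Bool))),
    lines.foldl
      (fun (st : PySem.Dict String Int × PySem.Dict String Bool) nc =>
        let counts := st.1.modify nc.1 0 (· + 1)
        let ok := nc.2 == some true
        let link_any := st.2.insert nc.1 (st.2.getD nc.1 false || ok)
        (counts, link_any))
      (pvMapVal (fun cs => (cs.length : Int)) g, pvMapVal (fun cs => cs.any (· == some true)) g)
    = (pvMapVal (fun cs => (cs.length : Int))
          (lines.foldl (fun g nc => g.modify nc.1 [] (· ++ [nc.2])) g),
       pvMapVal (fun cs => cs.any (· == some true))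
          (lines.foldl (fun g nc => g.modify nc.1 [] (· ++ [nc.2])) g)) := by
  induction lines with
  | nil => intro g; rfl
  | cons nc rest ih =>
    intro g
    simp only [List.foldl_cons]
    have hstep := pv_step g nc.1 nc.2
    rw [Prod.mk.injEq] at hstep
    obtain ⟨h1, h2⟩ := hstep
    rw [h1, h2]
    exact ih (g.modify nc.1 [] (· ++ [nc.2]))

-- ===== VERDICT (by name: the statement is the Claim_ definition above) =====
theorem aggregate_counts_and_link_py_spec : Claim_equal_aggregate_counts_and_link_py := by
  intro lines _
  unfold Spec_aggregate_counts_and_link_py aggregate_counts_and_link_py aggregate_counts_and_link_py_alt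
  have h := pv_main lines PySem.Dict.empty
  simp only []
  rw [show (PySem.Dict.empty : PySem.Dict String Int) = pvMapVal (fun cs : List (Option Bool) => (cs.length : Int)) PySem.Dict.empty by rfl,
      show (PySem.Dict.empty : PySem.Dict String Bool) = pvMapVal (fun cs : List (Option Bool) => cs.any (· == some true)) PySem.Dict.empty by rfl,
      h]
  rfl
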